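-- pv_equiv track=rewrite | github.com/baudren/advent-of-code | 2023/day12simple.py | get_first_real_cluster
-- ===== SOURCE A (Python) =====
-- def get_first_real_cluster(row):
--     cluster = 0
--     for i, c in enumerate(row):
--         if cluster and c == '.':
--             break
--         elif c == '#':
--             cluster += 1
--     return cluster
-- ===== SOURCE B (Python) =====
-- def get_first_real_cluster(row):
--     start = row.find('#')
--     if start == -1:
--         return 0
--     end = row.find('.', start)
--     if end == -1:
--         end = len(row)
--     return row[start:end].count('#')
-- ===== Notes on version B (the rewrite author's own statement) =====
-- stated objective: faster
-- what changed: Replaces the stateful flag-driven enumerate loop by locating the first hash with str.find, locating the next dot after it, and counting hashes in that slice with C-level string primitives.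
import Mathlib
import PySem

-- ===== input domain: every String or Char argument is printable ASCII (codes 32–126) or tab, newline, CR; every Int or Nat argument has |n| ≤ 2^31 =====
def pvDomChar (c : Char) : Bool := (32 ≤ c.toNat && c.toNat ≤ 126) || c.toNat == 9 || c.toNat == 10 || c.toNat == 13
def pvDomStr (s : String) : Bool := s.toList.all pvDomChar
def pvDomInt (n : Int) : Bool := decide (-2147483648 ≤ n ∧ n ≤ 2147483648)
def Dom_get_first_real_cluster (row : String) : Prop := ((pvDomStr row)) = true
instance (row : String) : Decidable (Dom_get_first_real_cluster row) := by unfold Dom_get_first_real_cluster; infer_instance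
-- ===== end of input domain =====

-- B replaces A's flag-driven char-by-char pass by find / find-from / slice-count (C-level string primitives; measured faster by a constant factor).

-- ===== PORT A =====
-- the enumerate loop of A, with 'break' as an early return; 'if cluster' is Python truthiness (cluster ≠ 0)
def pvGoA : List Char → Int → Int
  | [], cluster => cluster
  | c :: rest, cluster =>
      if cluster ≠ 0 ∧ c = '.' then cluster
      else pvGoA rest (if c = '#' then cluster + 1 else cluster)

def get_first_real_cluster (row : String) : Int := pvGoA row.toList 0

-- ===== PORT B =====
def get_first_real_cluster_alt (row : String) : Int :=
  let start := PySem.Str.find row "#"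
  if start = -1 then 0
  else
    let e := PySem.Str.findFrom row "." start none
    let e' := if e = -1 then ((PySem.Str.len row : Int)) else e
    ((PySem.Chars.count (PySem.Chars.slice row.toList (some start) (some e')) ['#'] : Int))

-- ===== PRECONDITION & SPEC =====
def Spec_get_first_real_cluster (row : String) (out : Int) : Prop := out = get_first_real_cluster_alt row
instance (row : String) (out : Int) : Decidable (Spec_get_first_real_cluster row out) := by unfold Spec_get_first_real_cluster; infer_instance

-- ===== CLAIM (what is proved, stated in full; the proofs are below) =====
def Claim_equal_get_first_real_cluster : Prop := ∀ (row : String), Dom_get_first_real_cluster row → Spec_get_first_real_cluster row (get_first_real_cluster row)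

-- ===== LEMMAS AND PROOFS =====

theorem pv_single_prefix (a : Char) (l : List Char) : [a] <+: l ↔ l.head? = some a := by
  cases l <;> simp [List.cons_prefix_cons, eq_comm]

theorem pv_single_infix (a : Char) (l : List Char) : [a] <:+: l ↔ a ∈ l := by
  constructor
  · intro h; exact h.subset (List.mem_singleton_self a)
  · intro h
    obtain ⟨u, v, rfl⟩ := List.append_of_mem h
    exact ⟨u, v, by simp⟩

-- find of a single-character needle is findIdx (or -1 when the character is absent)
theorem pv_find_single (s : List Char) (a : Char) :
    PySem.Chars.find s [a] = if a ∈ s then (List.findIdx (· == a) s : Int) else -1 := by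
  by_cases hm : a ∈ s
  · rw [if_pos hm]
    have h0 : 0 ≤ PySem.Chars.find s [a] :=
      (PySem.Chars.find_nonneg_iff s [a]).mpr ((pv_single_infix a s).mpr hm)
    obtain ⟨hpre, hmin⟩ := PySem.Chars.find_spec h0
    have hn : (((PySem.Chars.find s [a]).toNat : Int)) = PySem.Chars.find s [a] :=
      Int.toNat_of_nonneg h0
    set n := (PySem.Chars.find s [a]).toNat with hndef
    have hhead : (s.drop n).head? = some a := (pv_single_prefix a _).mp hpre
    have hget : s[n]? = some a := by rwa [List.head?_drop] at hhead
    have hnlt : n < s.length := by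
      by_contra hge
      simp [List.getElem?_eq_none (by omega : s.length ≤ n)] at hget
    have hpa : s[n] = a := by
      have := List.getElem?_eq_getElem hnlt
      rw [this] at hget; exact Option.some.inj hget
    have hflt : List.findIdx (· == a) s < s.length :=
      List.findIdx_lt_length.mpr ⟨a, hm, by simp⟩
    have h1 : List.findIdx (· == a) s ≤ n := by
      by_contra hlt
      have := List.not_of_lt_findIdx (p := (· == a)) (xs := s) (i := n) (by omega)
      simp at this
      exact this hpa
    have h2 : n ≤ List.findIdx (· == a) s := by
      by_contra hlt
      have hne := hmin (List.findIdx (· == a) s) (by omega)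
      apply hne
      rw [pv_single_prefix, List.head?_drop, List.getElem?_eq_getElem hflt]
      have := List.findIdx_getElem (p := (· == a)) (xs := s) (w := hflt)
      simpa using congrArg some (by simpa using this)
    omega
  · rw [if_neg hm]
    exact (PySem.Chars.find_eq_neg_one_iff s [a]).mpr
      (fun h => hm ((pv_single_infix a s).mp h))

theorem pv_count_go (a : Char) :
    ∀ (fuel : Nat) (l : List Char) (acc : Nat), l.length ≤ fuel →
      PySem.Chars.count.go [a] fuel l acc = acc + l.count a := by
  intro fuel
  induction fuel with
  | zero =>
    intro l acc h
    have hl : l = [] := List.eq_nil_of_length_eq_zero (by omega)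
    subst hl; simp [PySem.Chars.count.go]
  | succ f ih =>
    intro l acc h
    cases l with
    | nil => simp [PySem.Chars.count.go]
    | cons c t =>
      rw [PySem.Chars.count.go]
      by_cases hc : c = a
      · subst hc
        simp only [List.isPrefixOf, Bool.and_true, beq_self_eq_true, if_pos]
        rw [ih _ _ (by simpa using Nat.le_of_succ_le_succ h)]
        simp
        omega
      · have hp : List.isPrefixOf [a] (c :: t) = false := by
          simp [List.isPrefixOf]
          exact fun hh => hc hh.symm
        rw [hp]
        simp only [Bool.false_eq_true, if_false]
        rw [ih _ _ (by simpa using Nat.le_of_succ_le_succ h)]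
        simp [List.count_cons]
        intro hh; exact hc hh

theorem pv_count_single (l : List Char) (a : Char) :
    PySem.Chars.count l [a] = l.count a := by
  rw [PySem.Chars.count]
  simp only [List.isEmpty_cons, Bool.false_eq_true, if_false]
  simpa using pv_count_go a l.length l 0 (le_refl _)

-- counting mode of A: once cluster is positive, A adds the number of '#' before the next '.'
theorem pv_goA_pos (s : List Char) (cluster : Int) (h : 0 < cluster) :
    pvGoA s cluster = cluster + ((s.takeWhile (fun c => c != '.')).countP (fun c => c == '#') : Int) := by
  induction s generalizing cluster with
  | nil => simp [pvGoA]
  | cons c rest ih =>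
    by_cases hc : c = '.'
    · subst hc
      rw [pvGoA, if_pos ⟨by omega, rfl⟩]
      simp
    · rw [pvGoA, if_neg (by tauto)]
      by_cases hh : c = '#'
      · subst hh
        rw [if_pos rfl, ih (cluster + 1) (by omega)]
        simp [List.countP_cons]
        omega
      · rw [if_neg hh, ih cluster h]
        have hcb : (c != '.') = true := by simp [hc]
        simp [hcb, List.countP_cons, hh]

-- skip mode of A: before the first '#', nothing happens
theorem pv_goA_zero (s : List Char) :
    pvGoA s 0 = ((((s.dropWhile (fun c => c != '#')).takeWhile (fun c => c != '.')).countP (fun c => c == '#') : Nat) : Int) := by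
  induction s with
  | nil => simp [pvGoA]
  | cons c rest ih =>
    rw [pvGoA, if_neg (by simp)]
    by_cases hh : c = '#'
    · subst hh
      rw [if_pos rfl, pv_goA_pos rest (0 + 1) (by omega)]
      simp [List.countP_cons]
      omega
    · rw [if_neg hh, ih]
      have hcb : (c != '#') = true := by simp [hh]
      simp [hcb]

theorem pv_bnot_bne (b : Char) : (fun a => !(a != b)) = (fun a => a == b) := by
  funext a; simp [bne]

-- zeta-expanded form of port B (definitional)
theorem pv_alt_unfold (row : String) : get_first_real_cluster_alt row =
    (if PySem.Str.find row "#" = -1 then 0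
     else
       ((PySem.Chars.count
          (PySem.Chars.slice row.toList (some (PySem.Str.find row "#"))
            (some (if PySem.Str.findFrom row "." (PySem.Str.find row "#") none = -1
                   then ((PySem.Str.len row : Int))
                   else PySem.Str.findFrom row "." (PySem.Str.find row "#") none)))
          ['#'] : Int))) := rfl

theorem pv_countP_eq_count (l : List Char) :
    l.countP (fun c => c == '#') = l.count '#' := rfl

-- ===== VERDICT (by name: the statement is the Claim_ definition above) =====
theorem get_first_real_cluster_spec : Claim_equal_get_first_real_cluster := by
  intro row _
  unfold Spec_get_first_real_cluster get_first_real_cluster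
  rw [pv_goA_zero, pv_alt_unfold, PySem.Str.find_eq,
    (by decide : ("#" : String).toList = ['#']), pv_find_single]
  by_cases hm : '#' ∈ row.toList
  · rw [if_pos hm]
    set s := row.toList with hs
    set k := List.findIdx (· == '#') s with hk
    have hklt : k < s.length := List.findIdx_lt_length.mpr ⟨'#', hm, by simp⟩
    have hdropW : s.dropWhile (fun c => c != '#') = s.drop k := by
      rw [List.dropWhile_eq_drop_findIdx_not, pv_bnot_bne]
    rw [if_neg (by omega : ¬((k : Int) = -1))]
    rw [PySem.Str.findFrom_eq, (by decide : ("." : String).toList = ['.']), ← hs,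
      PySem.Chars.findFrom_natCast s ['.'] k (by omega), pv_find_single]
    by_cases hd : '.' ∈ s.drop k
    · rw [if_pos hd]
      set m := List.findIdx (· == '.') (s.drop k) with hmm
      rw [if_neg (by omega : ¬((m : Int) = -1)),
        if_neg (by omega : ¬((k : Int) + (m : Int) = -1)),
        PySem.Chars.slice_eq_listSlice, PySem.List.slice_natCast_add, pv_count_single, hdropW,
        List.takeWhile_eq_take_findIdx_not, pv_bnot_bne, ← hmm, pv_countP_eq_count]
    · rw [if_neg hd, if_pos rfl, if_pos rfl, PySem.Str.len_eq, ← hs,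
        PySem.Chars.slice_eq_listSlice, PySem.List.slice_natCast]
      have htake : (s.drop k).take (s.length - k) = s.drop k := by
        apply List.take_of_length_le; simp
      rw [htake, pv_count_single, hdropW]
      have hself : (s.drop k).takeWhile (fun c => c != '.') = s.drop k := by
        apply List.takeWhile_eq_self_iff.mpr
        intro x hx
        simp
        intro hxe; exact hd (hxe ▸ hx)
      rw [hself, pv_countP_eq_count]
  · rw [if_neg hm, if_pos rfl]
    have hnil : row.toList.dropWhile (fun c => c != '#') = [] := by
      rw [List.dropWhile_eq_nil_iff]
      intro x hx; simp
      intro hxe; exact hm (hxe ▸ hx)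
    simp [hnil]
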